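-- pv_equiv track=rewrite | github.com/leaf76/lazy_blacktea | ui/async_device_manager.py | _parse_track_payload
-- ===== SOURCE A (Python) =====
-- from collections import OrderedDict
--
-- def _parse_track_payload(payload_text: str) -> OrderedDict[str, str]:
--     """Convert a payload block into an ordered serial->status mapping."""
--     snapshot: OrderedDict[str, str] = OrderedDict()
--     for raw_line in payload_text.splitlines():
--         line = raw_line.strip()
--         if not line or line.startswith('List of devices attached'):
--             continue
--
--         parts = line.split()
--         if not parts:
--             continue
--
--         serial = parts[0].strip()
--         status = parts[1].strip() if len(parts) > 1 else ''
--
--         if serial in snapshot: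
--             snapshot.pop(serial)
--         snapshot[serial] = status
--
--     return snapshot
-- ===== SOURCE B (Python) =====
-- from collections import OrderedDict
--
-- def _parse_track_payload(payload_text: str) -> OrderedDict[str, str]:
--     """Collect (serial, status) pairs first, then dedup keeping the last occurrence."""
--     pairs = []
--     for raw_line in payload_text.splitlines():
--         line = raw_line.strip()
--         if not line or line.startswith('List of devices attached'):
--             continue
--         parts = line.split()
--         if not parts:
--             continue
--         pairs.append((parts[0].strip(), parts[1].strip() if len(parts) > 1 else ''))
--     seen = set()
--     rev = []
--     for serial, status in reversed(pairs):
--         if serial not in seen: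
--             seen.add(serial)
--             rev.append((serial, status))
--     snapshot: OrderedDict[str, str] = OrderedDict()
--     for serial, status in reversed(rev):
--         snapshot[serial] = status
--     return snapshot
-- ===== Notes on version B (the rewrite author's own statement) =====
-- stated objective: alternative
-- what changed: A builds the ordered map incrementally with a pop-then-reinsert move-to-end on every duplicate serial; B first collects the plain (serial, status) pair list, then dedups it in one reverse pass with a seen-set, and finally builds the OrderedDict from the re-reversed result.
import Mathlib
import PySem

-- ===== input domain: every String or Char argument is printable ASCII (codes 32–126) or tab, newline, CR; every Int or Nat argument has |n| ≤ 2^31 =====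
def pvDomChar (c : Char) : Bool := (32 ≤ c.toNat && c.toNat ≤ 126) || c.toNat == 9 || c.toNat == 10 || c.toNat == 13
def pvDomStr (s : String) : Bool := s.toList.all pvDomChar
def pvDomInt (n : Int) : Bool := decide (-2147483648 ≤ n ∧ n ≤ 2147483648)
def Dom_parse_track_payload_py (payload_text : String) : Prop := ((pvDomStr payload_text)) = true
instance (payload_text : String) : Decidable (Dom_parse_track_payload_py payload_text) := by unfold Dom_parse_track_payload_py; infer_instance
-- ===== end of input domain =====

-- B replaces A's incremental pop-then-reinsert OrderedDict with a collect-pairs-then-reverse-dedup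
-- decomposition (objective: alternative decomposition, same cost).

-- ===== PORT A =====
def parse_track_payload_py (payload_text : String) : List (String × String) :=
  ((PySem.Str.splitlines payload_text).foldl
    (fun (snapshot : PySem.Dict String String) raw_line =>
      let line := PySem.Str.strip raw_line
      if line == "" || PySem.Str.startswith line "List of devices attached" then snapshot
      else
        match PySem.Str.split₀ line with
        | [] => snapshot
        | p0 :: rest =>
          let serial := PySem.Str.strip p0
          let status := match rest with
            | [] => ""
            | p1 :: _ => PySem.Str.strip p1
          let snapshot := if snapshot.contains serial then snapshot.erase serial else snapshot
          snapshot.insert serial status)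
    PySem.Dict.empty).items

-- ===== PORT B =====
-- Source B's first loop: collect the (serial, status) pairs in line order.
def pvAltPairs (payload_text : String) : List (String × String) :=
  (PySem.Str.splitlines payload_text).foldl
    (fun (acc : List (String × String)) raw_line =>
      let line := PySem.Str.strip raw_line
      if line == "" || PySem.Str.startswith line "List of devices attached" then acc
      else
        match PySem.Str.split₀ line with
        | [] => acc
        | p0 :: rest =>
          acc ++ [(PySem.Str.strip p0,
                   match rest with
                   | [] => ""
                   | p1 :: _ => PySem.Str.strip p1)]) []

-- Source B's second loop: scan the pairs reversed, keep first occurrence of each serial (seen set).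
def pvAltRevDedup (pairs : List (String × String)) : List (String × String) :=
  (pairs.reverse.foldl
    (fun (st : PySem.Set String × List (String × String)) p =>
      if PySem.Set.contains st.1 p.1 then st else (PySem.Set.add st.1 p.1, st.2 ++ [p]))
    (PySem.Set.empty, [])).2

-- Source B's third loop: build the OrderedDict from the re-reversed deduped list.
def pvAltBuild (rev : List (String × String)) : List (String × String) :=
  (rev.reverse.foldl
    (fun (snapshot : PySem.Dict String String) p => snapshot.insert p.1 p.2)
    PySem.Dict.empty).items

def parse_track_payload_py_alt (payload_text : String) : List (String × String) :=
  pvAltBuild (pvAltRevDedup (pvAltPairs payload_text))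

-- ===== PRECONDITION & SPEC =====
def Spec_parse_track_payload_py (payload_text : String) (out : List (String × String)) : Prop := out = parse_track_payload_py_alt payload_text
instance (payload_text : String) (out : List (String × String)) : Decidable (Spec_parse_track_payload_py payload_text out) := by unfold Spec_parse_track_payload_py; infer_instance

-- ===== CLAIM (what is proved, stated in full; the proofs are below) =====
def Claim_equal_parse_track_payload_py : Prop := ∀ (payload_text : String), Dom_parse_track_payload_py payload_text → Spec_parse_track_payload_py payload_text (parse_track_payload_py payload_text)

-- ===== LEMMAS AND PROOFS =====

-- The per-line pair extraction both programs perform.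
def pvExt (raw_line : String) : Option (String × String) :=
  let line := PySem.Str.strip raw_line
  if line == "" || PySem.Str.startswith line "List of devices attached" then none
  else
    match PySem.Str.split₀ line with
    | [] => none
    | p0 :: rest =>
      some (PySem.Str.strip p0,
            match rest with
            | [] => ""
            | p1 :: _ => PySem.Str.strip p1)

-- A's dict step, on pairs.
def pvStepA (d : PySem.Dict String String) (p : String × String) : PySem.Dict String String :=
  (if d.contains p.1 then d.erase p.1 else d).insert p.1 p.2

-- B's reverse-dedup, as a structural recursion over the pair list (seen-set threaded).
def pvD (l : List (String × String)) (seen : PySem.Set String) : List (String × String) :=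
  match l with
  | [] => []
  | p :: t => if PySem.Set.contains seen p.1 then pvD t seen else p :: pvD t (PySem.Set.add seen p.1)

theorem pvContains_true {seen : PySem.Set String} {x : String} (h : x ∈ seen) :
    PySem.Set.contains seen x = true := by
  rw [PySem.Set.contains_iff]; exact h

theorem pvContains_false {seen : PySem.Set String} {x : String} (h : x ∉ seen) :
    PySem.Set.contains seen x = false := by
  rw [Bool.eq_false_iff]
  exact fun hc => h ((PySem.Set.contains_iff _ _).1 hc)

theorem pvD_cons_mem (p : String × String) (t : List (String × String))
    (seen : PySem.Set String) (h : p.1 ∈ seen) : pvD (p :: t) seen = pvD t seen := by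
  simp only [pvD]
  rw [if_pos (pvContains_true h)]

theorem pvD_cons_not_mem (p : String × String) (t : List (String × String))
    (seen : PySem.Set String) (h : p.1 ∉ seen) :
    pvD (p :: t) seen = p :: pvD t (PySem.Set.add seen p.1) := by
  simp only [pvD]
  rw [if_neg (by simpa using h)]

theorem pvStepA_pointwise (d : PySem.Dict String String) (x : String) :
    (let line := PySem.Str.strip x
     if line == "" || PySem.Str.startswith line "List of devices attached" then d
     else
       match PySem.Str.split₀ line with
       | [] => d
       | p0 :: rest =>
         let serial := PySem.Str.strip p0
         let status := match rest with
           | [] => ""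
           | p1 :: _ => PySem.Str.strip p1
         let d := if d.contains serial then d.erase serial else d
         d.insert serial status)
    = (pvExt x).elim d (pvStepA d) := by
  unfold pvExt pvStepA
  simp only []
  cases hc : (PySem.Str.strip x == "" || PySem.Str.startswith (PySem.Str.strip x) "List of devices attached") with
  | true =>
    rw [if_pos rfl, if_pos rfl]
    rfl
  | false =>
    rw [if_neg Bool.false_ne_true, if_neg Bool.false_ne_true]
    cases hs : PySem.Str.split₀ (PySem.Str.strip x) with
    | nil => rfl
    | cons p0 rest => rfl

theorem pvStepB_pointwise (acc : List (String × String)) (x : String) :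
    (let line := PySem.Str.strip x
     if line == "" || PySem.Str.startswith line "List of devices attached" then acc
     else
       match PySem.Str.split₀ line with
       | [] => acc
       | p0 :: rest =>
         acc ++ [(PySem.Str.strip p0,
                  match rest with
                  | [] => ""
                  | p1 :: _ => PySem.Str.strip p1)])
    = (pvExt x).elim acc (fun p => acc ++ [p]) := by
  unfold pvExt
  simp only []
  cases hc : (PySem.Str.strip x == "" || PySem.Str.startswith (PySem.Str.strip x) "List of devices attached") with
  | true =>
    rw [if_pos rfl, if_pos rfl]
    rfl
  | false =>
    rw [if_neg Bool.false_ne_true, if_neg Bool.false_ne_true]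
    cases hs : PySem.Str.split₀ (PySem.Str.strip x) with
    | nil => rfl
    | cons p0 rest => rfl

theorem pvFoldl_omatch {α β σ : Type} (g : α → Option β) (f : σ → β → σ) (l : List α) (s : σ) :
    l.foldl (fun s x => (g x).elim s (f s)) s
      = (l.filterMap g).foldl f s := by
  induction l generalizing s with
  | nil => rfl
  | cons x t ih =>
    simp only [List.foldl_cons, List.filterMap_cons]
    cases g x <;> simp [ih]

theorem pvFoldl_omatch_append {α β : Type} (g : α → Option β) (l : List α) (acc : List β) :
    l.foldl (fun acc x => (g x).elim acc (fun b => acc ++ [b])) acc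
      = acc ++ l.filterMap g := by
  induction l generalizing acc with
  | nil => simp
  | cons x t ih =>
    simp only [List.foldl_cons, List.filterMap_cons]
    cases g x <;> simp [ih]

set_option maxHeartbeats 1000000 in
theorem pvPortA_char (payload_text : String) :
    parse_track_payload_py payload_text
      = (((PySem.Str.splitlines payload_text).filterMap pvExt).foldl pvStepA
          PySem.Dict.empty).items := by
  unfold parse_track_payload_py
  rw [show (fun (snapshot : PySem.Dict String String) raw_line =>
      let line := PySem.Str.strip raw_line
      if line == "" || PySem.Str.startswith line "List of devices attached" then snapshot
      else
        match PySem.Str.split₀ line with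
        | [] => snapshot
        | p0 :: rest =>
          let serial := PySem.Str.strip p0
          let status := match rest with
            | [] => ""
            | p1 :: _ => PySem.Str.strip p1
          let snapshot := if snapshot.contains serial then snapshot.erase serial else snapshot
          snapshot.insert serial status)
    = (fun (d : PySem.Dict String String) x => (pvExt x).elim d (pvStepA d))
    from funext fun d => funext fun x => pvStepA_pointwise d x]
  rw [pvFoldl_omatch pvExt pvStepA (PySem.Str.splitlines payload_text) PySem.Dict.empty]

set_option maxHeartbeats 1000000 in
theorem pvAltPairs_char (payload_text : String) :
    pvAltPairs payload_text = (PySem.Str.splitlines payload_text).filterMap pvExt := by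
  unfold pvAltPairs
  rw [show (fun (acc : List (String × String)) raw_line =>
      let line := PySem.Str.strip raw_line
      if line == "" || PySem.Str.startswith line "List of devices attached" then acc
      else
        match PySem.Str.split₀ line with
        | [] => acc
        | p0 :: rest =>
          acc ++ [(PySem.Str.strip p0,
                   match rest with
                   | [] => ""
                   | p1 :: _ => PySem.Str.strip p1)])
    = (fun (acc : List (String × String)) x => (pvExt x).elim acc (fun p => acc ++ [p]))
    from funext fun acc => funext fun x => pvStepB_pointwise acc x]
  rw [pvFoldl_omatch_append pvExt (PySem.Str.splitlines payload_text) [], List.nil_append]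

theorem pvB_rev_fold (l : List (String × String)) (seen : PySem.Set String)
    (acc : List (String × String)) :
    (l.foldl (fun (st : PySem.Set String × List (String × String)) p =>
        if PySem.Set.contains st.1 p.1 then st else (PySem.Set.add st.1 p.1, st.2 ++ [p]))
      (seen, acc)).2 = acc ++ pvD l seen := by
  induction l generalizing seen acc with
  | nil => simp [pvD]
  | cons p t ih =>
    simp only [List.foldl_cons]
    by_cases hm : p.1 ∈ seen
    · rw [pvD_cons_mem p t seen hm]
      simp only [pvContains_true hm]
      exact ih seen acc
    · rw [pvD_cons_not_mem p t seen hm]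
      simp only [pvContains_false hm, Bool.false_eq_true, if_false]
      rw [ih (PySem.Set.add seen p.1) (acc ++ [p])]
      simp

theorem pvAltRevDedup_char (pairs : List (String × String)) :
    pvAltRevDedup pairs = pvD pairs.reverse PySem.Set.empty := by
  unfold pvAltRevDedup
  rw [pvB_rev_fold, List.nil_append]

-- membership-extensionality for pvD
theorem pvD_ext (l : List (String × String)) (s₁ s₂ : PySem.Set String)
    (h : ∀ x, x ∈ s₁ ↔ x ∈ s₂) : pvD l s₁ = pvD l s₂ := by
  induction l generalizing s₁ s₂ with
  | nil => rfl
  | cons p t ih =>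
    by_cases hm : p.1 ∈ s₁
    · rw [pvD_cons_mem p t s₁ hm, pvD_cons_mem p t s₂ ((h p.1).1 hm)]
      exact ih s₁ s₂ h
    · rw [pvD_cons_not_mem p t s₁ hm,
        pvD_cons_not_mem p t s₂ (fun hx => hm ((h p.1).2 hx))]
      congr 1
      apply ih
      intro x
      simp only [PySem.Set.mem_add, h x]

-- keys already seen never appear in pvD's output
theorem pvD_no_seen_key (l : List (String × String)) (seen : PySem.Set String)
    (s : String) (hs : s ∈ seen) :
    (pvD l seen).filter (fun q => !(q.1 == s)) = pvD l seen := by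
  induction l generalizing seen with
  | nil => rfl
  | cons p t ih =>
    by_cases hm : p.1 ∈ seen
    · rw [pvD_cons_mem p t seen hm]
      exact ih seen hs
    · have hne : p.1 ≠ s := fun he => hm (he ▸ hs)
      rw [pvD_cons_not_mem p t seen hm, List.filter_cons]
      have hkeep : (!(p.1 == s)) = true := by simp [hne]
      rw [hkeep, if_pos rfl, ih (PySem.Set.add seen p.1) (by simp [PySem.Set.mem_add, hs])]

-- enlarging the seen set by s filters out key s from pvD's output
theorem pvD_add_filter (l : List (String × String)) (seen : PySem.Set String) (s : String) :
    pvD l (PySem.Set.add seen s) = (pvD l seen).filter (fun q => !(q.1 == s)) := by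
  induction l generalizing seen with
  | nil => rfl
  | cons p t ih =>
    by_cases hm : p.1 ∈ seen
    · rw [pvD_cons_mem p t _ (by simp [PySem.Set.mem_add, hm]),
        pvD_cons_mem p t seen hm]
      exact ih seen
    · by_cases he : p.1 = s
      · subst he
        rw [pvD_cons_mem p t _ (by simp [PySem.Set.mem_add]),
          pvD_cons_not_mem p t seen hm, List.filter_cons]
        have hdrop : (!(p.1 == p.1)) = false := by simp
        rw [hdrop, if_neg (by simp),
          pvD_no_seen_key t (PySem.Set.add seen p.1) p.1 (by simp [PySem.Set.mem_add])]
      · rw [pvD_cons_not_mem p t _ (by simp [PySem.Set.mem_add, hm, he]),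
          pvD_cons_not_mem p t seen hm, List.filter_cons]
        have hkeep : (!(p.1 == s)) = true := by simp [he]
        rw [hkeep, if_pos rfl]
        congr 1
        rw [pvD_ext t (PySem.Set.add (PySem.Set.add seen s) p.1)
          (PySem.Set.add (PySem.Set.add seen p.1) s)
          (by intro x; simp [PySem.Set.mem_add]; tauto)]
        exact ih (PySem.Set.add seen p.1)

-- A's combined pop-then-insert step, at the items level.
theorem pvStepA_items (d : PySem.Dict String String) (p : String × String) :
    (pvStepA d p).items = d.items.filter (fun q => !(q.1 == p.1)) ++ [p] := by
  unfold pvStepA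
  by_cases h : d.contains p.1 = true
  · simp [h, PySem.Dict.insert, PySem.Dict.erase]
  · have h' : ∀ q ∈ d.items, (q.1 == p.1) = false := by
      intro q hq
      by_contra hb
      simp only [Bool.not_eq_false] at hb
      exact h (by simpa [PySem.Dict.contains] using List.any_of_mem (p := fun q => q.1 == p.1) hq hb)
    have hfix : List.filter (fun q => !(q.1 == p.1)) d.items = d.items :=
      List.filter_eq_self.2 (fun q hq => by simp [h' q hq])
    simp [h, PySem.Dict.insert, hfix]

-- Master lemma: A's dict fold over a pair list has items = reverse of B's reverse-dedup.
theorem pvMaster (pairs : List (String × String)) :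
    (pairs.foldl pvStepA PySem.Dict.empty).items
      = (pvD pairs.reverse PySem.Set.empty).reverse := by
  induction pairs using List.reverseRecOn with
  | nil => rfl
  | append_singleton ps p ih =>
    rw [List.foldl_append, List.foldl_cons, List.foldl_nil, pvStepA_items, ih,
      List.reverse_append]
    simp only [List.reverse_cons, List.reverse_nil, List.nil_append, List.singleton_append]
    rw [pvD_cons_not_mem p ps.reverse PySem.Set.empty (by simp [PySem.Set.empty])]
    rw [List.reverse_cons, pvD_add_filter ps.reverse PySem.Set.empty p.1, ← List.filter_reverse]

-- Keys produced by pvD are distinct and avoid the seen set.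
theorem pvD_keys_nodup (l : List (String × String)) (seen : PySem.Set String) :
    ((pvD l seen).map Prod.fst).Nodup ∧ ∀ q ∈ pvD l seen, q.1 ∉ seen := by
  induction l generalizing seen with
  | nil => simp [pvD]
  | cons p t ih =>
    by_cases hm : p.1 ∈ seen
    · rw [pvD_cons_mem p t seen hm]
      exact ih seen
    · rw [pvD_cons_not_mem p t seen hm]
      obtain ⟨hnd, havoid⟩ := ih (PySem.Set.add seen p.1)
      refine ⟨List.nodup_cons.2 ⟨?_, hnd⟩, ?_⟩
      · intro hmem
        obtain ⟨q, hq, hq1⟩ := List.mem_map.1 hmem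
        exact havoid q hq (by simp [PySem.Set.mem_add, hq1])
      · intro q hq
        rcases List.mem_cons.1 hq with hq | hq
        · subst hq; exact hm
        · exact fun hmem => havoid q hq (by simp [PySem.Set.mem_add, hmem])

-- Rebuilding the dict from distinct-key pairs returns exactly those pairs.
theorem pvAltBuild_char (l : List (String × String)) (hnd : (l.reverse.map Prod.fst).Nodup) :
    pvAltBuild l = l.reverse := by
  unfold pvAltBuild
  have := PySem.Dict.items_foldl_insert_fresh (l := l.reverse) (k := Prod.fst) (v := Prod.snd)
    (d := PySem.Dict.empty) (by intro a _; rfl) hnd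
  simpa using this

-- ===== VERDICT (by name: the statement is the Claim_ definition above) =====
theorem parse_track_payload_py_spec : Claim_equal_parse_track_payload_py := by
  intro payload_text _
  unfold Spec_parse_track_payload_py parse_track_payload_py_alt
  rw [pvPortA_char, pvAltPairs_char, pvAltRevDedup_char, pvMaster]
  rw [pvAltBuild_char]
  rw [List.map_reverse]
  exact List.nodup_reverse.2 (pvD_keys_nodup _ _).1
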